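-- pv_equiv track=rewrite | github.com/SEdeepL/GraphLoRA | ground-truth/groundtruth.py | normalize_patch
-- ===== SOURCE A (Python) =====
-- def normalize_patch(p: str) -> str:
--     """
--     清理 patch 文本中的多余空格和换行：
--     - 去掉每行末尾的多余空白
--     - 去掉开头/结尾的空行
--     - 将连续空行压缩为一个
--     """
--     lines = p.splitlines()
--
--     # 去掉每行末尾的空格/Tab
--     lines = [ln.rstrip() for ln in lines]
--
--     # 去掉开头空行
--     while lines and not lines[0].strip():
--         lines.pop(0)
--
--     # 去掉结尾空行
--     while lines and not lines[-1].strip():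
--         lines.pop()
--
--     # 压缩中间连续空行
--     normalized_lines = []
--     last_blank = False
--     for ln in lines:
--         if not ln.strip():  # 空行
--             if last_blank:
--                 continue      # 跳过多余的空行
--             last_blank = True
--             normalized_lines.append("")  # 保留一个空行
--         else:
--             last_blank = False
--             normalized_lines.append(ln)
--
--     return "\n".join(normalized_lines)
-- ===== SOURCE B (Python) =====
-- def normalize_patch(p: str) -> str:
--     lines = [ln.rstrip() for ln in p.splitlines()]
--     # keep a line iff it is nonblank or its predecessor is: this drops the
--     # leading blank run and keeps only the first blank of every other run
--     kept = [ln for prev, ln in zip([""] + lines, lines) if ln or prev]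
--     if kept and not kept[-1]:
--         kept.pop()
--     return "\n".join(kept)
-- ===== Notes on version B (the rewrite author's own statement) =====
-- stated objective: simpler
-- what changed: Replaced A's two leading/trailing pop-while loops plus a last_blank flag state machine by a single zip-with-previous filter pass (keep a line iff it or its predecessor is nonblank) followed by popping at most one trailing blank.
import Mathlib
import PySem

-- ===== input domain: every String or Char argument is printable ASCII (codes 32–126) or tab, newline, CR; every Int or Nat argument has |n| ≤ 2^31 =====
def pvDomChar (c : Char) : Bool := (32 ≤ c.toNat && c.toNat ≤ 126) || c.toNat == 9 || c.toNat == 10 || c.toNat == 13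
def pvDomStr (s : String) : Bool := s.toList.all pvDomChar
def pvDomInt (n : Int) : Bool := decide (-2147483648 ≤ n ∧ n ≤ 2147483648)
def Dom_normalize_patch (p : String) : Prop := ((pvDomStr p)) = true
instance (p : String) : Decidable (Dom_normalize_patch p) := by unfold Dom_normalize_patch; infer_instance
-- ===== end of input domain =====

-- B replaces A's trim/flag state machine by one zip-with-previous filter pass plus a single
-- trailing pop (simpler decomposition, same O(n) cost).


-- ===== PORT A =====
-- while lines and not lines[0].strip(): lines.pop(0)
def pyPopLeading : List String → List String
  | [] => []
  | ln :: rest => if PySem.Str.strip ln = "" then pyPopLeading rest else ln :: rest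

-- while lines and not lines[-1].strip(): lines.pop()
def pyPopTrailing : List String → List String
  | [] => []
  | ln :: rest =>
    match pyPopTrailing rest with
    | [] => if PySem.Str.strip ln = "" then [] else [ln]
    | r => ln :: r

def normalize_patch (p : String) : String :=
  let lines := (PySem.Str.splitlines p).map PySem.Str.rstrip
  let lines := pyPopLeading lines
  let lines := pyPopTrailing lines
  let st := lines.foldl (fun (st : List String × Bool) ln =>
      if PySem.Str.strip ln = "" then
        if st.2 then st else (st.1 ++ [""], true)
      else (st.1 ++ [ln], false)) ([], false)
  PySem.Str.join "\n" st.1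

-- ===== PORT B =====
def normalize_patch_alt (p : String) : String :=
  let lines := (PySem.Str.splitlines p).map PySem.Str.rstrip
  let kept := ((("" :: lines).zip lines).filter
      (fun pr => pr.2 != "" || pr.1 != "")).map Prod.snd
  let kept := if kept.getLast? = some "" then kept.dropLast else kept
  PySem.Str.join "\n" kept

-- ===== PRECONDITION & SPEC =====
def Spec_normalize_patch (p : String) (out : String) : Prop := out = normalize_patch_alt p
instance (p : String) (out : String) : Decidable (Spec_normalize_patch p out) := by unfold Spec_normalize_patch; infer_instance

-- ===== CLAIM (what is proved, stated in full; the proofs are below) =====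
def Claim_equal_normalize_patch : Prop := ∀ (p : String), Dom_normalize_patch p → Spec_normalize_patch p (normalize_patch p)

-- ===== LEMMAS AND PROOFS =====

-- proof-only helpers: the same pipeline with the blank test replaced by (= "")
def popT : List String → List String
  | [] => []
  | ln :: rest =>
    match popT rest with
    | [] => if ln = "" then [] else [ln]
    | r => ln :: r

def colRec : Bool → List String → List String
  | _, [] => []
  | lb, ln :: rest =>
    if ln = "" then (if lb then colRec true rest else "" :: colRec true rest)
    else ln :: colRec false rest

def keptRec : String → List String → List String
  | _, [] => []
  | prev, ln :: rest => (if ln ≠ "" ∨ prev ≠ "" then [ln] else []) ++ keptRec ln rest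

def trimLast (l : List String) : List String :=
  if l.getLast? = some "" then l.dropLast else l

-- dropWhile head property
theorem dropWhile_head_false {α : Type} (p : α → Bool) (l : List α) (h t' : _)
    (hE : l.dropWhile p = h :: t') : p h = false := by
  induction l with
  | nil => simp at hE
  | cons a as ih =>
    rw [List.dropWhile_cons] at hE
    split at hE
    · exact ih hE
    · cases hE; simp_all

theorem strip_rstrip_eq_nil_iff (cs : List Char) :
    PySem.Chars.strip (PySem.Chars.rstrip cs) = [] ↔ PySem.Chars.rstrip cs = [] := by
  constructor
  · intro hs
    by_contra hne
    set r := PySem.Chars.rstrip cs with hr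
    have hrev : r.reverse = cs.reverse.dropWhile PySem.Chars.isspace := by
      simp [hr, PySem.Chars.rstrip]
    obtain ⟨h, t, hht⟩ : ∃ h t, r.reverse = h :: t := by
      cases hrv : r.reverse with
      | nil => exact absurd (by simpa using hrv) hne
      | cons a b => exact ⟨a, b, rfl⟩
    have hhf : PySem.Chars.isspace h = false :=
      dropWhile_head_false _ _ _ _ (hrev ▸ hht)
    have hrform : r = t.reverse ++ [h] := by
      have := congrArg List.reverse hht; simpa using this
    -- lstrip r = a' ++ [h]
    have hl : ∃ a', PySem.Chars.lstrip r = a' ++ [h] := by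
      rw [hrform]
      unfold PySem.Chars.lstrip
      rw [List.dropWhile_append]
      split
      · exact ⟨[], by simp [hhf]⟩
      · exact ⟨_, rfl⟩
    obtain ⟨a', ha'⟩ := hl
    have : PySem.Chars.strip r ≠ [] := by
      unfold PySem.Chars.strip
      rw [ha']
      unfold PySem.Chars.rstrip
      simp [hhf]
    exact this hs
  · intro h; rw [h]; rfl

theorem strip_rstrip_str (t : String) :
    (PySem.Str.strip (PySem.Str.rstrip t) = "" ↔ PySem.Str.rstrip t = "") := by
  simp [PySem.Str.strip, PySem.Str.rstrip, String.toList_ofList,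
    strip_rstrip_eq_nil_iff]

-- P2: B's filter pass is keptRec
theorem kept_eq_keptRec (l : List String) : ∀ prev,
    (((prev :: l).zip l).filter (fun pr => pr.2 != "" || pr.1 != "")).map Prod.snd
      = keptRec prev l := by
  induction l with
  | nil => intro prev; rfl
  | cons x xs ih =>
    intro prev
    simp only [List.zip_cons_cons, List.filter_cons, keptRec]
    by_cases hx : x = "" <;> by_cases hp : prev = "" <;>
      simp [hx, hp, ih x, ih ""]

-- P1: keptRec = colRec with flag "previous was blank"
theorem keptRec_eq_colRec (l : List String) : ∀ prev,
    keptRec prev l = colRec (decide (prev = "")) l := by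
  induction l with
  | nil => intro prev; rfl
  | cons x xs ih =>
    intro prev
    by_cases hx : x = "" <;> by_cases hp : prev = "" <;>
      simp [keptRec, colRec, hx, hp, ih x, ih ""]

-- P3: colRec true skips the leading blank run
theorem colRec_true_dropWhile (l : List String) :
    colRec true l = colRec false (l.dropWhile (fun s => s == "")) := by
  induction l with
  | nil => rfl
  | cons x xs ih =>
    by_cases hx : x = "" <;> simp [colRec, hx, ih]

-- P4/P5: emptiness characterizations
theorem popT_eq_nil_iff (l : List String) : popT l = [] ↔ ∀ s ∈ l, s = "" := by
  induction l with
  | nil => simp [popT]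
  | cons x xs ih =>
    simp only [popT]
    cases hr : popT xs with
    | nil =>
      rw [hr] at ih
      have hall : ∀ s ∈ xs, s = "" := ih.mp rfl
      by_cases hx : x = ""
      · simpa [hx] using hall
      · simp [hx]
    | cons a b =>
      rw [hr] at ih
      simp only [reduceCtorEq, false_iff] at ih
      constructor
      · intro h; exact absurd h (by simp)
      · intro h; exact absurd (fun s hs => h s (List.mem_cons_of_mem _ hs)) ih

theorem colRec_true_eq_nil_iff (l : List String) : colRec true l = [] ↔ ∀ s ∈ l, s = "" := by
  induction l with
  | nil => simp [colRec]
  | cons x xs ih =>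
    by_cases hx : x = "" <;> simp [colRec, hx, ih]

-- P6
theorem trimLast_cons (x : String) (ys : List String) (h : x ≠ "" ∨ ys ≠ []) :
    trimLast (x :: ys) = x :: trimLast ys := by
  cases ys with
  | nil =>
    simp only [trimLast]
    simp only [List.getLast?_singleton, List.getLast?_nil]
    rcases h with h | h
    · simp [h]
    · simp at h
  | cons a b =>
    simp only [trimLast, List.getLast?_cons_cons]
    split <;> rfl

-- P7 main: popping trailing blanks before collapsing = collapsing then trimming one blank
theorem colRec_popT (l : List String) : ∀ lb, colRec lb (popT l) = trimLast (colRec lb l) := by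
  induction l with
  | nil => intro lb; rfl
  | cons x xs ih =>
    intro lb
    simp only [popT]
    cases hr : popT xs with
    | nil =>
      have hall : ∀ s ∈ xs, s = "" := (popT_eq_nil_iff xs).mp hr
      have htrue : colRec true xs = [] := (colRec_true_eq_nil_iff xs).mpr hall
      by_cases hx : x = ""
      · subst hx
        cases lb <;>
          simp [colRec, htrue, trimLast]
      · have hfalse : colRec false xs = [] ∨ colRec false xs = [""] := by
          cases xs with
          | nil => left; rfl
          | cons a b =>
            right
            have ha : a = "" := hall a (by simp)
            have : colRec true b = [] :=
              (colRec_true_eq_nil_iff b).mpr (fun s hs => hall s (by simp [hs]))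
            simp [colRec, ha, this]
        rcases hfalse with hf | hf <;>
          cases lb <;> simp [colRec, hx, hf, trimLast]
    | cons a b =>
      have hne : popT xs ≠ [] := by simp [hr]
      have hxs_ne : ¬ ∀ s ∈ xs, s = "" := fun hc => hne ((popT_eq_nil_iff xs).mpr hc)
      show colRec lb (x :: a :: b) = trimLast (colRec lb (x :: xs))
      rw [← hr]
      by_cases hx : x = ""
      · subst hx
        have hct : colRec true xs ≠ [] := fun hc => hxs_ne ((colRec_true_eq_nil_iff xs).mp hc)
        cases lb
        · rw [show colRec false ("" :: popT xs) = "" :: colRec true (popT xs) by simp [colRec],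
            show colRec false ("" :: xs) = "" :: colRec true xs by simp [colRec],
            ih true, trimLast_cons _ _ (Or.inr hct)]
        · rw [show colRec true ("" :: popT xs) = colRec true (popT xs) by simp [colRec],
            show colRec true ("" :: xs) = colRec true xs by simp [colRec], ih true]
      · simp only [colRec, if_neg hx]
        rw [ih false, trimLast_cons _ _ (Or.inl hx)]

theorem popT_subset (l : List String) : popT l ⊆ l := by
  induction l with
  | nil => simp [popT]
  | cons x xs ih =>
    intro s hs
    simp only [popT] at hs
    cases hpt : popT xs with
    | nil =>
      rw [hpt] at hs
      simp only at hs
      split at hs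
      · simp at hs
      · simp at hs; simp [hs]
    | cons a b =>
      rw [hpt] at hs
      simp only at hs
      rcases List.mem_cons.mp hs with h | h
      · simp [h]
      · exact List.mem_cons_of_mem _ (ih (hpt ▸ h))

theorem popLeading_congr (l : List String) (H : ∀ s ∈ l, (PySem.Str.strip s = "" ↔ s = "")) :
    pyPopLeading l = l.dropWhile (fun s => s == "") := by
  induction l with
  | nil => rfl
  | cons x xs ih =>
    have hx := H x (by simp)
    by_cases h : x = ""
    · subst h
      have hse : PySem.Str.strip "" = "" := hx.mpr rfl
      simp [pyPopLeading, hse, ih (fun s hs => H s (List.mem_cons_of_mem _ hs))]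
    · have hns : ¬ PySem.Str.strip x = "" := fun hc => h (hx.mp hc)
      simp [pyPopLeading, h, hns]

theorem popTrailing_congr (l : List String) (H : ∀ s ∈ l, (PySem.Str.strip s = "" ↔ s = "")) :
    pyPopTrailing l = popT l := by
  induction l with
  | nil => rfl
  | cons x xs ih =>
    have hx := H x (by simp)
    have hxs := ih (fun s hs => H s (List.mem_cons_of_mem _ hs))
    simp only [pyPopTrailing, popT, hxs, hx]

theorem foldl_eq_colRec (l : List String) (H : ∀ s ∈ l, (PySem.Str.strip s = "" ↔ s = "")) :
    ∀ (acc : List String) (lb : Bool),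
    (l.foldl (fun (st : List String × Bool) ln =>
      if PySem.Str.strip ln = "" then
        if st.2 then st else (st.1 ++ [""], true)
      else (st.1 ++ [ln], false)) (acc, lb)).1 = acc ++ colRec lb l := by
  induction l with
  | nil => intro acc lb; simp [colRec]
  | cons x xs ih =>
    intro acc lb
    have hx := H x (by simp)
    have ih' := ih (fun s hs => H s (List.mem_cons_of_mem _ hs))
    rw [List.foldl_cons]
    by_cases h : x = ""
    · subst h
      rw [if_pos (hx.mpr rfl)]
      cases lb
      · simp only [Bool.false_eq_true, if_false, ih', colRec]
        simp
      · simp only [if_true, ih', colRec]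
    · have hns : ¬ PySem.Str.strip x = "" := fun hc => h (hx.mp hc)
      rw [if_neg hns, ih', colRec, if_neg h]
      simp

theorem normalize_patch_spec : Claim_equal_normalize_patch := by
  intro p _
  show normalize_patch p = normalize_patch_alt p
  have hA : normalize_patch p = PySem.Str.join "\n"
      ((((pyPopTrailing (pyPopLeading ((PySem.Str.splitlines p).map PySem.Str.rstrip)))).foldl
        (fun (st : List String × Bool) ln =>
          if PySem.Str.strip ln = "" then
            if st.2 then st else (st.1 ++ [""], true)
          else (st.1 ++ [ln], false)) ([], false)).1) := rfl
  have hB : normalize_patch_alt p = PySem.Str.join "\n"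
      (trimLast ((((("" :: (PySem.Str.splitlines p).map PySem.Str.rstrip).zip
          ((PySem.Str.splitlines p).map PySem.Str.rstrip)).filter
        (fun pr => pr.2 != "" || pr.1 != "")).map Prod.snd))) := rfl
  rw [hA, hB]
  set l := (PySem.Str.splitlines p).map PySem.Str.rstrip with hl
  have H : ∀ s ∈ l, (PySem.Str.strip s = "" ↔ s = "") := by
    intro s hs
    rw [hl] at hs
    obtain ⟨t, -, rfl⟩ := List.mem_map.mp hs
    exact strip_rstrip_str t
  have Hd : ∀ s ∈ l.dropWhile (fun s => s == ""), (PySem.Str.strip s = "" ↔ s = "") :=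
    fun s hs => H s ((List.dropWhile_sublist _).subset hs)
  have Hp : ∀ s ∈ popT (l.dropWhile (fun s => s == "")),
      (PySem.Str.strip s = "" ↔ s = "") :=
    fun s hs => Hd s (popT_subset _ hs)
  rw [popLeading_congr l H, popTrailing_congr _ Hd, foldl_eq_colRec _ Hp, List.nil_append,
    colRec_popT, ← colRec_true_dropWhile, show colRec true l = keptRec "" l from
      (keptRec_eq_colRec l "").symm.trans (by norm_num), kept_eq_keptRec l ""]
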